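-- pv_equiv track=rewrite | github.com/Zachanardo/Intellicrack | intellicrack/core/analysis/radare2_json_standardizer.py | _get_complexity_distribution
-- ===== SOURCE A (Python) =====
-- from typing import Any
--
-- def _get_complexity_distribution(functions: list[dict[str, Any]]) -> dict[str, int]:
--     """Get complexity distribution."""
--     distribution = {"low": 0, "medium": 0, "high": 0}
--     for func in functions:
--         complexity = func.get("complexity", 1)
--         if complexity < 5:
--             distribution["low"] += 1
--         elif complexity < 15:
--             distribution["medium"] += 1
--         else:
--             distribution["high"] += 1
--     return distribution
-- ===== SOURCE B (Python) =====
-- def _get_complexity_distribution(functions):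
--     """Get complexity distribution (three independent per-bucket aggregations)."""
--     low = sum(1 for f in functions if f.get("complexity", 1) < 5)
--     medium = sum(1 for f in functions if 5 <= f.get("complexity", 1) < 15)
--     high = sum(1 for f in functions if f.get("complexity", 1) >= 15)
--     return {"low": low, "medium": medium, "high": high}
-- ===== Notes on version B (the rewrite author's own statement) =====
-- stated objective: alternative
-- what changed: Replaced the single per-element branching tally loop over a mutable dict with three independent whole-list aggregations, one per bucket, assembled into the result dict at the end.
import Mathlib
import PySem

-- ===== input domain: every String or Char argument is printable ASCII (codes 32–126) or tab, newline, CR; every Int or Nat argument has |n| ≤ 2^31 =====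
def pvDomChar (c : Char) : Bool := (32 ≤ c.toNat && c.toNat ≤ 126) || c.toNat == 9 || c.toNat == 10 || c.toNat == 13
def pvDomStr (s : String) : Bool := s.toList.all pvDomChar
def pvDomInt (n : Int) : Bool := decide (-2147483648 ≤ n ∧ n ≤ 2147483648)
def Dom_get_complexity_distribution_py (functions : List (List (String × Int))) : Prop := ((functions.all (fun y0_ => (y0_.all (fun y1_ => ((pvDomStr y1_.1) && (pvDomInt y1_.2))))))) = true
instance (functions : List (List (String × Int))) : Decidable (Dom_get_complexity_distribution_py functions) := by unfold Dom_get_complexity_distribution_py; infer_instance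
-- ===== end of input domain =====

-- B replaces A's single branching tally loop by three independent per-bucket aggregations (alternative decomposition, same cost).


-- ===== PORT A =====
-- for-loop over functions mutating the distribution dict, transliterated as a foldl over a PySem.Dict
def get_complexity_distribution_py (functions : List (List (String × Int))) : List (String × Int) :=
  (functions.foldl
    (fun d func =>
      let complexity := (PySem.Dict.mk func).getD "complexity" 1
      if complexity < 5 then d.modify "low" 0 (· + 1)
      else if complexity < 15 then d.modify "medium" 0 (· + 1)
      else d.modify "high" 0 (· + 1))
    (((PySem.Dict.empty.insert "low" 0).insert "medium" 0).insert "high" 0)).items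

-- ===== PORT B =====
-- func.get("complexity", 1)
def pvCplx (func : List (String × Int)) : Int := (PySem.Dict.mk func).getD "complexity" 1

def get_complexity_distribution_py_alt (functions : List (List (String × Int))) : List (String × Int) :=
  let low : Int := (functions.countP (fun f => pvCplx f < 5) : Nat)
  let medium : Int := (functions.countP (fun f => decide (5 ≤ pvCplx f ∧ pvCplx f < 15)) : Nat)
  let high : Int := (functions.countP (fun f => 15 ≤ pvCplx f) : Nat)
  [("low", low), ("medium", medium), ("high", high)]

-- ===== PRECONDITION & SPEC =====
def Spec_get_complexity_distribution_py (functions : List (List (String × Int))) (out : List (String × Int)) : Prop := out = get_complexity_distribution_py_alt functions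
instance (functions : List (List (String × Int))) (out : List (String × Int)) : Decidable (Spec_get_complexity_distribution_py functions out) := by unfold Spec_get_complexity_distribution_py; infer_instance

-- ===== CLAIM (what is proved, stated in full; the proofs are below) =====
def Claim_equal_get_complexity_distribution_py : Prop := ∀ (functions : List (List (String × Int))), Dom_get_complexity_distribution_py functions → Spec_get_complexity_distribution_py functions (get_complexity_distribution_py functions)

-- ===== LEMMAS AND PROOFS =====
lemma fold_invariant (fs : List (List (String × Int))) (a b c : Int) :
    (fs.foldl
      (fun d func =>
        let complexity := (PySem.Dict.mk func).getD "complexity" 1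
        if complexity < 5 then d.modify "low" 0 (· + 1)
        else if complexity < 15 then d.modify "medium" 0 (· + 1)
        else d.modify "high" 0 (· + 1))
      (PySem.Dict.mk [("low", a), ("medium", b), ("high", c)])).items
    = [("low", a + (fs.countP (fun f => pvCplx f < 5) : Nat)),
       ("medium", b + (fs.countP (fun f => decide (5 ≤ pvCplx f ∧ pvCplx f < 15)) : Nat)),
       ("high", c + (fs.countP (fun f => 15 ≤ pvCplx f) : Nat))] := by
  induction fs generalizing a b c with
  | nil => simp
  | cons f fs ih =>
    have h1d : ((PySem.Dict.mk f).getD "complexity" 1 < 5) = (pvCplx f < 5) := rfl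
    have h2d : ((PySem.Dict.mk f).getD "complexity" 1 < 15) = (pvCplx f < 15) := rfl
    simp only [List.foldl_cons, List.countP_cons, h1d, h2d, decide_eq_true_eq]
    by_cases h1 : pvCplx f < 5
    · have hm : (PySem.Dict.mk [("low", a), ("medium", b), ("high", c)]).modify "low" 0 (· + 1)
          = PySem.Dict.mk [("low", a + 1), ("medium", b), ("high", c)] := by
        simp [PySem.Dict.modify, PySem.Dict.contains, PySem.Dict.insert, PySem.Dict.getD, PySem.Dict.get?]
      have h5 : ¬ (5 ≤ pvCplx f ∧ pvCplx f < 15) := by omega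
      have h15 : ¬ (15 ≤ pvCplx f) := by omega
      rw [if_pos h1, hm, ih]
      simp only [if_pos h1, if_neg h5, if_neg h15, List.cons.injEq, Prod.mk.injEq]
      and_intros <;> first | trivial | omega
    · by_cases h2 : pvCplx f < 15
      · have hm : (PySem.Dict.mk [("low", a), ("medium", b), ("high", c)]).modify "medium" 0 (· + 1)
            = PySem.Dict.mk [("low", a), ("medium", b + 1), ("high", c)] := by
          simp [PySem.Dict.modify, PySem.Dict.contains, PySem.Dict.insert, PySem.Dict.getD, PySem.Dict.get?]
        have h5 : 5 ≤ pvCplx f ∧ pvCplx f < 15 := by omega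
        have h15 : ¬ (15 ≤ pvCplx f) := by omega
        rw [if_neg h1, if_pos h2, hm, ih]
        simp only [if_neg h1, if_pos h5, if_neg h15, List.cons.injEq, Prod.mk.injEq]
        and_intros <;> first | trivial | omega
      · have hm : (PySem.Dict.mk [("low", a), ("medium", b), ("high", c)]).modify "high" 0 (· + 1)
            = PySem.Dict.mk [("low", a), ("medium", b), ("high", c + 1)] := by
          simp [PySem.Dict.modify, PySem.Dict.contains, PySem.Dict.insert, PySem.Dict.getD, PySem.Dict.get?]
        have h5 : ¬ (5 ≤ pvCplx f ∧ pvCplx f < 15) := by omega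
        have h15 : 15 ≤ pvCplx f := by omega
        rw [if_neg h1, if_neg h2, hm, ih]
        simp only [if_neg h1, if_neg h5, if_pos h15, List.cons.injEq, Prod.mk.injEq]
        and_intros <;> first | trivial | omega

-- ===== VERDICT (by name: the statement is the Claim_ definition above) =====
theorem get_complexity_distribution_py_spec : Claim_equal_get_complexity_distribution_py := by
  intro functions _
  unfold Spec_get_complexity_distribution_py get_complexity_distribution_py get_complexity_distribution_py_alt
  have hinit : ((PySem.Dict.empty.insert "low" (0:Int)).insert "medium" 0).insert "high" 0
      = PySem.Dict.mk [("low", 0), ("medium", 0), ("high", 0)] := by decide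
  rw [hinit, fold_invariant]
  simp
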